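-- pv_equiv track=rewrite | github.com/StarfBerry/poke-scripts | RNG/Euclid.py | lcrng_recover_lower_16bits_ivs
-- ===== SOURCE A (Python) =====
-- from math import ceil
--
-- LCRNG_MUL      = 0x41C64E6D       # LCRNG mul constant
--
-- LCRNG_SUB      = 0xFFFF6074       # (LCRNG add - 0xFFFF) & 0xFFFFFFFF
--
-- LCRNG_BASE     = 0x41C60CA7B192   # (LCRNG_MUL + 1) * 0xFFFF
--
-- LCRNG_PRIME    = 0x25
--
-- LCRNG_RMAX     = 0x250000
--
-- LCRNG_SKIP2    = 0x39F158
--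
-- def lcrng_recover_lower_16bits_ivs(hp, atk, dfs, spa, spd, spe):
--     first = (hp | (atk << 5) | (dfs << 10)) << 16
--     second = (spe | (spa << 5) | (spd << 10)) << 16
--
--     k = 0
--     t = (second - LCRNG_MUL * first - LCRNG_SUB) & 0x7fffffff
--     x = (t * LCRNG_PRIME) % LCRNG_MUL
--     kmax = (LCRNG_BASE - t) >> 31
--
--     res = []
--     while k <= kmax: # at most 117 iterations
--         r = (x + LCRNG_SKIP2 * k) % LCRNG_MUL
--         if r % LCRNG_PRIME == 0 and r < LCRNG_RMAX:
--             tmp = t + k * 0x80000000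
--             s = first | (tmp // LCRNG_MUL)
--             res.extend((s, s ^ 0x80000000))
--
--         k += ceil((LCRNG_MUL - r) / LCRNG_SKIP2)
--
--     return res
-- ===== SOURCE B (Python) =====
-- LCRNG_MUL   = 0x41C64E6D
-- LCRNG_SUB   = 0xFFFF6074
-- LCRNG_BASE  = 0x41C60CA7B192
-- LCRNG_PRIME = 0x25
-- LCRNG_RMAX  = 0x250000
-- LCRNG_SKIP2 = 0x39F158
--
-- def lcrng_recover_lower_16bits_ivs(hp, atk, dfs, spa, spd, spe):
--     first = (hp | (atk << 5) | (dfs << 10)) << 16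
--     second = (spe | (spa << 5) | (spd << 10)) << 16
--     t = (second - LCRNG_MUL * first - LCRNG_SUB) & 0x7fffffff
--     x = (t * LCRNG_PRIME) % LCRNG_MUL
--     kmax = (LCRNG_BASE - t) >> 31
--     res = []
--     for k in range(kmax + 1):
--         r = (x + LCRNG_SKIP2 * k) % LCRNG_MUL
--         if r % LCRNG_PRIME == 0 and r < LCRNG_RMAX:
--             s = first | ((t + k * 0x80000000) // LCRNG_MUL)
--             res.extend((s, s ^ 0x80000000))
--     return res
-- ===== Notes on version B (the rewrite author's own statement) =====
-- stated objective: simpler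
-- what changed: Replaced A's skip-step while-loop (which jumps k by ceil((MUL-r)/SKIP2) each iteration) with a plain exhaustive for-loop over k in range(kmax+1) testing every k; since SKIP2 > RMAX every skipped k fails the r < RMAX test, so the output is identical.
import Mathlib
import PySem

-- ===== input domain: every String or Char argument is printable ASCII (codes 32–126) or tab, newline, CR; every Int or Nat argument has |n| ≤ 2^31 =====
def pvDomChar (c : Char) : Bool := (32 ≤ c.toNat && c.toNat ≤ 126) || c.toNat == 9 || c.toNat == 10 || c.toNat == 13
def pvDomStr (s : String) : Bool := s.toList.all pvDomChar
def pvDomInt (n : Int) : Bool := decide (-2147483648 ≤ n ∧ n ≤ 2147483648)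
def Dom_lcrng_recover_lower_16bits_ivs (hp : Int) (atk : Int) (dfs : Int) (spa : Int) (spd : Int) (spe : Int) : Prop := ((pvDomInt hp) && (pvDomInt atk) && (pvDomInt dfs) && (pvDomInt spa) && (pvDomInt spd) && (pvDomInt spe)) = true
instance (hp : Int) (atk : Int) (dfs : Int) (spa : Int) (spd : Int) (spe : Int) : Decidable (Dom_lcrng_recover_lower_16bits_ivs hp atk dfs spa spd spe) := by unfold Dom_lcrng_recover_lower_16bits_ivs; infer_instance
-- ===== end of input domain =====

-- ===== PORT A =====
-- B is the plain exhaustive scan over k (a for-range loop) instead of A's skip-jump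
-- while-loop; same outputs, simpler structure, not faster.
def pvMUL : Int := 1103515245
def pvSUB : Int := 4294926452
def pvBASE : Int := 72318871646610
def pvPRIME : Int := 37
def pvRMAX : Int := 2424832
def pvSKIP2 : Int := 3797336

-- A's while-loop, fuel = (kmax+1).toNat (each iteration increases k by at least 1,
-- so this fuel is never exhausted before the loop condition fails).
def pvLoopA (x t first kmax : Int) : Nat → Int → List Int → List Int
  | 0, _, res => res
  | fuel + 1, k, res =>
    if k ≤ kmax then
      let r := PySem.Int.mod (x + pvSKIP2 * k) pvMUL
      let res' :=
        if PySem.Int.mod r pvPRIME = 0 ∧ r < pvRMAX then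
          let tmp := t + k * 2147483648
          let s := PySem.Int.bor first (PySem.Int.floordiv tmp pvMUL)
          res ++ [s, PySem.Int.bxor s 2147483648]
        else res
      -- math.ceil((LCRNG_MUL - r)/LCRNG_SKIP2) ported as exact integer ceiling
      -- -((-(MUL-r)) // SKIP2); exact here since the float division of these
      -- magnitudes never rounds across an integer.
      pvLoopA x t first kmax fuel (k + -(PySem.Int.floordiv (-(pvMUL - r)) pvSKIP2)) res'
    else res

def lcrng_recover_lower_16bits_ivs (hp : Int) (atk : Int) (dfs : Int) (spa : Int) (spd : Int) (spe : Int) : List Int :=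
  let first := (PySem.Int.bor (PySem.Int.bor hp (atk <<< (5:Nat))) (dfs <<< (10:Nat))) <<< (16:Nat)
  let second := (PySem.Int.bor (PySem.Int.bor spe (spa <<< (5:Nat))) (spd <<< (10:Nat))) <<< (16:Nat)
  let t := PySem.Int.band (second - pvMUL * first - pvSUB) 2147483647
  let x := PySem.Int.mod (t * pvPRIME) pvMUL
  let kmax := (pvBASE - t) >>> (31:Nat)
  pvLoopA x t first kmax (kmax + 1).toNat 0 []


-- ===== PORT B =====
def lcrng_recover_lower_16bits_ivs_alt (hp : Int) (atk : Int) (dfs : Int) (spa : Int) (spd : Int) (spe : Int) : List Int :=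
  let first := (PySem.Int.bor (PySem.Int.bor hp (atk <<< (5:Nat))) (dfs <<< (10:Nat))) <<< (16:Nat)
  let second := (PySem.Int.bor (PySem.Int.bor spe (spa <<< (5:Nat))) (spd <<< (10:Nat))) <<< (16:Nat)
  let t := PySem.Int.band (second - pvMUL * first - pvSUB) 2147483647
  let x := PySem.Int.mod (t * pvPRIME) pvMUL
  let kmax := (pvBASE - t) >>> (31:Nat)
  (PySem.List.pyRange 0 (kmax + 1) 1).foldl (fun res k =>
    let r := PySem.Int.mod (x + pvSKIP2 * k) pvMUL
    if PySem.Int.mod r pvPRIME = 0 ∧ r < pvRMAX then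
      let s := PySem.Int.bor first (PySem.Int.floordiv (t + k * 2147483648) pvMUL)
      res ++ [s, PySem.Int.bxor s 2147483648]
    else res) []


-- ===== PRECONDITION & SPEC =====
def Spec_lcrng_recover_lower_16bits_ivs (hp : Int) (atk : Int) (dfs : Int) (spa : Int) (spd : Int) (spe : Int) (out : List Int) : Prop := out = lcrng_recover_lower_16bits_ivs_alt hp atk dfs spa spd spe
instance (hp : Int) (atk : Int) (dfs : Int) (spa : Int) (spd : Int) (spe : Int) (out : List Int) : Decidable (Spec_lcrng_recover_lower_16bits_ivs hp atk dfs spa spd spe out) := by unfold Spec_lcrng_recover_lower_16bits_ivs; infer_instance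

-- ===== CLAIM (what is proved, stated in full; the proofs are below) =====
def Claim_equal_lcrng_recover_lower_16bits_ivs : Prop := ∀ (hp : Int) (atk : Int) (dfs : Int) (spa : Int) (spd : Int) (spe : Int), Dom_lcrng_recover_lower_16bits_ivs hp atk dfs spa spd spe → Spec_lcrng_recover_lower_16bits_ivs hp atk dfs spa spd spe (lcrng_recover_lower_16bits_ivs hp atk dfs spa spd spe)

-- ===== LEMMAS AND PROOFS =====

def pvEmit (x t first : Int) (k : Int) : List Int :=
  let r := PySem.Int.mod (x + pvSKIP2 * k) pvMUL
  if PySem.Int.mod r pvPRIME = 0 ∧ r < pvRMAX then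
    let s := PySem.Int.bor first (PySem.Int.floordiv (t + k * 2147483648) pvMUL)
    [s, PySem.Int.bxor s 2147483648]
  else []

-- any k strictly between a visited k0 and the next visited k0 + d has
-- r = r0 + SKIP2*(k-k0) ≥ SKIP2 > RMAX, so it emits nothing
theorem pv_skip (x t first k : Int) (d : Int)
    (hd : (d - 1) * pvSKIP2 < pvMUL - PySem.Int.mod (x + pvSKIP2 * k) pvMUL) :
    ∀ j, k < j → j < k + d → pvEmit x t first j = [] := by
  intro j hj1 hj2
  have hm : (0:Int) < pvMUL := by norm_num [pvMUL]
  have hr0 : 0 ≤ PySem.Int.mod (x + pvSKIP2 * k) pvMUL := PySem.Int.mod_nonneg _ hm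
  set r := PySem.Int.mod (x + pvSKIP2 * k) pvMUL with hr
  have hle : pvSKIP2 * (j - k) ≤ pvSKIP2 * (d - 1) :=
    mul_le_mul_of_nonneg_left (by omega) (by norm_num [pvSKIP2])
  have hge : pvSKIP2 * 1 ≤ pvSKIP2 * (j - k) :=
    mul_le_mul_of_nonneg_left (by omega) (by norm_num [pvSKIP2])
  have hrj : PySem.Int.mod (x + pvSKIP2 * j) pvMUL = r + pvSKIP2 * (j - k) := by
    have he : PySem.Int.mod (x + pvSKIP2 * k) pvMUL = (x + pvSKIP2 * k) % pvMUL :=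
      PySem.Int.mod_eq_emod_of_pos hm
    have hq : x + pvSKIP2 * k = pvMUL * ((x + pvSKIP2 * k) / pvMUL) + r := by
      rw [hr, he]; exact (Int.mul_ediv_add_emod _ _).symm
    have hS : (0:Int) < pvSKIP2 := by norm_num [pvSKIP2]
    have hlb : 0 ≤ r + pvSKIP2 * (j - k) := by nlinarith [hge, hr0, hS]
    have hub : r + pvSKIP2 * (j - k) < pvMUL := by nlinarith [hle, hd]
    rw [PySem.Int.mod_eq_emod_of_pos hm]
    have heq : x + pvSKIP2 * j = r + pvSKIP2 * (j - k) + pvMUL * ((x + pvSKIP2 * k) / pvMUL) := by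
      linear_combination hq
    rw [heq, Int.add_mul_emod_self_left, Int.emod_eq_of_lt hlb hub]
  simp only [pvEmit, hrj]
  rw [if_neg]
  rintro ⟨-, hlt⟩
  have : (2424832:Int) < pvSKIP2 * 1 := by norm_num [pvSKIP2]
  simp only [pvRMAX] at hlt
  omega

theorem pv_main (x t first kmax : Int) :
    ∀ (fuel : Nat) (k : Int) (res : List Int), kmax + 1 - k ≤ (fuel : Int) →
    pvLoopA x t first kmax fuel k res =
      res ++ (PySem.List.pyRange k (kmax + 1) 1).flatMap (pvEmit x t first) := by
  intro fuel
  induction fuel with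
  | zero =>
    intro k res h
    rw [pvLoopA, PySem.List.pyRange_one_eq_nil (by exact_mod_cast by omega)]
    simp
  | succ f ih =>
    intro k res h
    by_cases hk : k ≤ kmax
    · have hm : (0:Int) < pvMUL := by norm_num [pvMUL]
      rw [pvLoopA, if_pos hk]
      set r := PySem.Int.mod (x + pvSKIP2 * k) pvMUL with hrdef
      have hr0 : 0 ≤ r := PySem.Int.mod_nonneg _ hm
      have hr1 : r < pvMUL := PySem.Int.mod_lt _ hm
      set d := -(PySem.Int.floordiv (-(pvMUL - r)) pvSKIP2) with hddef
      have hd : (d - 1) * pvSKIP2 < pvMUL - r ∧ pvMUL - r ≤ d * pvSKIP2 :=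
        (PySem.Int.neg_floordiv_neg_eq_iff_of_pos (by norm_num [pvSKIP2])).mp rfl
      have hd1 : 1 ≤ d := by nlinarith [hd.1, hd.2]
      rw [ih (k + d) _ (by push_cast at h ⊢; omega)]
      have hskip := pv_skip x t first k d (by rw [← hrdef]; exact hd.1)
      have hsplit : (PySem.List.pyRange (k+1) (kmax + 1) 1).flatMap (pvEmit x t first) =
          (PySem.List.pyRange (k+d) (kmax + 1) 1).flatMap (pvEmit x t first) := by
        by_cases hkd : k + d ≤ kmax + 1
        · rw [PySem.List.pyRange_one_append (k+1) (k+d) (kmax+1) (by omega) hkd,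
              List.flatMap_append, List.flatMap_eq_nil_iff.mpr, List.nil_append]
          intro j hj
          have := (PySem.List.mem_pyRange_one).mp hj
          exact hskip j (by omega) (by omega)
        · rw [PySem.List.pyRange_one_eq_nil (by omega : kmax + 1 ≤ k + d),
              List.flatMap_nil, List.flatMap_eq_nil_iff.mpr]
          intro j hj
          have := (PySem.List.mem_pyRange_one).mp hj
          exact hskip j (by omega) (by omega)
      rw [PySem.List.pyRange_one_cons (by omega : k < kmax + 1), List.flatMap_cons,
          ← hsplit]
      simp only [pvEmit, ← hrdef]
      split_ifs <;> (try simp)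
    · rw [pvLoopA, if_neg hk,
          PySem.List.pyRange_one_eq_nil (by omega : kmax + 1 ≤ k)]
      simp

theorem pv_AB (x t first kmax : Int) :
    pvLoopA x t first kmax (kmax + 1).toNat 0 [] =
      (PySem.List.pyRange 0 (kmax + 1) 1).foldl (fun res k =>
        let r := PySem.Int.mod (x + pvSKIP2 * k) pvMUL
        if PySem.Int.mod r pvPRIME = 0 ∧ r < pvRMAX then
          let s := PySem.Int.bor first (PySem.Int.floordiv (t + k * 2147483648) pvMUL)
          res ++ [s, PySem.Int.bxor s 2147483648]
        else res) [] := by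
  rw [pv_main x t first kmax _ 0 [] (by omega)]
  have hfun : (fun (res : List Int) k =>
      let r := PySem.Int.mod (x + pvSKIP2 * k) pvMUL
      if PySem.Int.mod r pvPRIME = 0 ∧ r < pvRMAX then
        let s := PySem.Int.bor first (PySem.Int.floordiv (t + k * 2147483648) pvMUL)
        res ++ [s, PySem.Int.bxor s 2147483648]
      else res) = fun res k => res ++ pvEmit x t first k := by
    funext res k
    simp only [pvEmit]
    split_ifs <;> simp
  rw [hfun, PySem.List.foldl_append_eq_flatMap]

-- ===== VERDICT (by name: the statement is the Claim_ definition above) =====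
theorem lcrng_recover_lower_16bits_ivs_spec : Claim_equal_lcrng_recover_lower_16bits_ivs := by
  intro hp atk dfs spa spd spe _
  unfold Spec_lcrng_recover_lower_16bits_ivs lcrng_recover_lower_16bits_ivs
    lcrng_recover_lower_16bits_ivs_alt
  exact pv_AB _ _ _ _
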